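-- pv_equiv track=rewrite | github.com/rosscon/rosscon_advent_of_code | 2020/day_10/02.py | find_sequences_of_gaps
-- ===== SOURCE A (Python) =====
-- def find_sequences_of_gaps(adaptors, gapSize = 1):
--     gapCounts = {}
--
--     currentSequenceCount = 0
--
--     for i in range(1, len(adaptors)):
--         diff = adaptors[i] - adaptors[i-1]
--
--         if diff > gapSize:
--
--             if currentSequenceCount in gapCounts:
--                 gapCounts[currentSequenceCount] += 1
--             else:
--                 gapCounts[currentSequenceCount] = 1
--
--             currentSequenceCount = 0
--         else:
--            currentSequenceCount += 1
--
--     return gapCounts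
-- ===== SOURCE B (Python) =====
-- def find_sequences_of_gaps(adaptors, gapSize = 1):
--     # Encode each adjacent gap as one character: '|' for a big gap, '.' for a small one.
--     marks = ''.join('|' if b - a > gapSize else '.' for a, b in zip(adaptors, adaptors[1:]))
--     # Runs of small gaps are exactly the pieces between '|' separators; the piece after
--     # the last '|' is never recorded, so drop it.
--     segments = marks.split('|')[:-1]
--     counts = {}
--     for seg in segments:
--         counts[len(seg)] = counts.get(len(seg), 0) + 1
--     return counts
-- ===== Notes on version B (the rewrite author's own statement) =====
-- stated objective: alternative
-- what changed: B encodes the adjacent gaps as a string of '.'/'|' marks, splits that string on '|' (dropping the trailing piece, which A never records), and tallies the segment lengths - replacing A's index loop that carries a running run-length counter and updates the dict online.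
import Mathlib
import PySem

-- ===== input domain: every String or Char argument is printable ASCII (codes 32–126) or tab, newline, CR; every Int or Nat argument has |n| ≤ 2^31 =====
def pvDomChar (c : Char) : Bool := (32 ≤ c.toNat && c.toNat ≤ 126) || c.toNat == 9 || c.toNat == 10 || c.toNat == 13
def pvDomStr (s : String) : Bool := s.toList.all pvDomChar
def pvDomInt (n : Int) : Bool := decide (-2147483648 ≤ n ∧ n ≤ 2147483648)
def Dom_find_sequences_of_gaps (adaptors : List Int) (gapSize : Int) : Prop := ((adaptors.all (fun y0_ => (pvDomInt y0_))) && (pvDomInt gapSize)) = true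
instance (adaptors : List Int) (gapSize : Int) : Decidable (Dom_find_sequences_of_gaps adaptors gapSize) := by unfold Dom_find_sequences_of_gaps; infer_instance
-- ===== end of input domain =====

-- B encodes the adjacent gaps as a '.'/'|' mark string, splits it on '|' (dropping the
-- trailing piece, which A never records) and tallies segment lengths, instead of A's
-- index loop carrying a running run-length counter (objective: alternative, same cost).

-- ===== PORT A =====
-- literal port of A: index loop over range(1, len(adaptors)), state (gapCounts, currentSequenceCount)
def find_sequences_of_gaps (adaptors : List Int) (gapSize : Int) : List (Int × Int) :=
  let r := (PySem.List.pyRange 1 (PySem.List.len adaptors) 1).foldl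
    (fun (s : PySem.Dict Int Int × Int) i =>
      let diff := PySem.List.pyGetD adaptors i 0 - PySem.List.pyGetD adaptors (i - 1) 0
      if diff > gapSize then
        (if s.1.contains s.2 then s.1.modify s.2 0 (· + 1) else s.1.insert s.2 1, 0)
      else
        (s.1, s.2 + 1))
    (PySem.Dict.empty, 0)
  r.1.items

-- ===== PORT B =====
-- literal port of B, on the List Char view of the strings (PySem.Chars is the exact
-- semantics layer: ''.join = Chars.join [], str.split('|') = Chars.splitOn · ['|'],
-- [:-1] = slice none (some (-1)), len = Chars.len)
def find_sequences_of_gaps_alt (adaptors : List Int) (gapSize : Int) : List (Int × Int) :=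
  let marks : List Char := PySem.Chars.join []
    ((List.zip adaptors (PySem.List.slice adaptors (some 1) none)).map
      (fun p => if p.2 - p.1 > gapSize then ['|'] else ['.']))
  let segments := PySem.List.slice (PySem.Chars.splitOn marks ['|']) none (some (-1))
  (segments.foldl
    (fun (d : PySem.Dict Int Int) seg =>
      d.insert ((PySem.Chars.len seg : Int)) (d.getD ((PySem.Chars.len seg : Int)) 0 + 1))
    PySem.Dict.empty).items

-- ===== PRECONDITION & SPEC =====
def Spec_find_sequences_of_gaps (adaptors : List Int) (gapSize : Int) (out : List (Int × Int)) : Prop := out = find_sequences_of_gaps_alt adaptors gapSize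
instance (adaptors : List Int) (gapSize : Int) (out : List (Int × Int)) : Decidable (Spec_find_sequences_of_gaps adaptors gapSize out) := by unfold Spec_find_sequences_of_gaps; infer_instance

-- ===== CLAIM (what is proved, stated in full; the proofs are below) =====
def Claim_equal_find_sequences_of_gaps : Prop := ∀ (adaptors : List Int) (gapSize : Int), Dom_find_sequences_of_gaps adaptors gapSize → Spec_find_sequences_of_gaps adaptors gapSize (find_sequences_of_gaps adaptors gapSize)

-- ===== LEMMAS AND PROOFS =====

-- proof-only mirror of single-char split: splitc ms = ms.split('|')
def splitc : List Char → List (List Char)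
  | [] => [[]]
  | c :: cs =>
      if c = '|' then [] :: splitc cs
      else match splitc cs with
        | [] => [[c]]
        | h :: t => (c :: h) :: t

theorem splitc_ne_nil (cs : List Char) : splitc cs ≠ [] := by
  cases cs with
  | nil => simp [splitc]
  | cons c cs =>
      unfold splitc
      by_cases h : c = '|'
      · simp [h]
      · simp only [h, if_neg, not_false_iff]
        cases splitc cs <;> simp

-- the fueled go of Chars.splitOn, for a single-char separator, computes splitc
theorem go_single (l : List Char) : ∀ (fuel : Nat) (cur : List Char) (acc : List (List Char)),
    l.length ≤ fuel →
    PySem.Chars.splitOn.go ['|'] fuel l cur acc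
      = acc.reverse ++ ((cur.reverse ++ (splitc l).headI) :: (splitc l).tail) := by
  induction l with
  | nil =>
      intro fuel cur acc _
      cases fuel <;> simp [PySem.Chars.splitOn.go, splitc]
  | cons c rest ih =>
      intro fuel cur acc hf
      cases fuel with
      | zero => simp at hf
      | succ fuel =>
          rw [PySem.Chars.splitOn.go]
          by_cases h : c = '|'
          · have hpre : List.isPrefixOf ['|'] (c :: rest) = true := by
              simp [List.isPrefixOf, h]
            simp only [hpre, if_pos, List.length_cons, List.length_nil, List.drop_succ_cons,
              List.drop_zero]
            have := ih fuel [] (cur.reverse :: acc) (by simpa using Nat.le_of_succ_le_succ hf)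
            simp only [List.drop_one, List.tail_cons] at this ⊢
            rw [this]
            simp only [splitc, h, if_pos, List.reverse_cons, List.append_assoc,
              List.nil_append, List.reverse_nil, List.tail_cons, List.headI]
            rcases hsr : splitc rest with _ | ⟨sh, st⟩
            · exact absurd hsr (splitc_ne_nil rest)
            · simp
          · have hpre : List.isPrefixOf ['|'] (c :: rest) = false := by
              simp [List.isPrefixOf]
              exact fun hc => (h hc.symm).elim
            simp only [hpre, Bool.false_eq_true, if_neg, not_false_iff]
            have := ih fuel (c :: cur) acc (by simpa using Nat.le_of_succ_le_succ hf)
            rw [this]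
            rcases hsc : splitc rest with _ | ⟨sh, st⟩
            · exact absurd hsc (splitc_ne_nil rest)
            · simp [splitc, h, hsc]

theorem splitOn_single (cs : List Char) : PySem.Chars.splitOn cs ['|'] = splitc cs := by
  unfold PySem.Chars.splitOn
  rw [go_single cs (cs.length + 1) [] [] (Nat.le_succ _)]
  rcases h : splitc cs with _ | ⟨sh, st⟩
  · exact absurd h (splitc_ne_nil cs)
  · simp

-- A's two-branch dict update is the unconditional counter update
theorem updA_eq_insert (d : PySem.Dict Int Int) (c : Int) :
    (if d.contains c then d.modify c 0 (· + 1) else d.insert c 1) = d.insert c (d.getD c 0 + 1) := by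
  by_cases h : d.contains c = true
  · simp [h, PySem.Dict.modify]
  · have hg := PySem.Dict.getD_of_not_contains d (k := c) (0 : Int) (by simpa using h)
    simp [h, hg]

-- tally step used on both sides
def ins (d : PySem.Dict Int Int) (n : Int) : PySem.Dict Int Int :=
  d.insert n (d.getD n 0 + 1)

def adjustFirst (k : Int) : List Int → List Int
  | [] => []
  | x :: xs => (k + x) :: xs

theorem adjustFirst_zero (xs : List Int) : adjustFirst 0 xs = xs := by
  cases xs <;> simp [adjustFirst]

-- THE loop-shape lemma: A's running-counter fold over the mark characters tallies
-- exactly the lengths of the split segments (trailing segment dropped), with the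
-- first segment extended by the incoming counter k
theorem loop_eq (ms : List Char) : ∀ (d : PySem.Dict Int Int) (k : Int),
    (ms.foldl (fun st c => if c = '|' then (ins st.1 st.2, 0) else (st.1, st.2 + 1)) (d, k)).1
      = (adjustFirst k (((splitc ms).dropLast).map (fun s => (s.length : Int)))).foldl ins d := by
  induction ms with
  | nil => intro d k; simp [splitc, adjustFirst]
  | cons c rest ih =>
      intro d k
      by_cases h : c = '|'
      · simp only [List.foldl_cons, h, if_pos]
        rw [ih (ins d k) 0, adjustFirst_zero]
        rcases hsc : splitc rest with _ | ⟨sh, st⟩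
        · exact absurd hsc (splitc_ne_nil rest)
        · simp [splitc, h, hsc, adjustFirst]
      · simp only [List.foldl_cons, h, if_neg, not_false_iff]
        rw [ih d (k + 1)]
        rcases hsc : splitc rest with _ | ⟨sh, st⟩
        · exact absurd hsc (splitc_ne_nil rest)
        · rcases st with _ | ⟨s2, st'⟩
          · simp [splitc, h, hsc, adjustFirst]
          · simp only [splitc, h, if_neg, not_false_iff, hsc, List.dropLast_cons_of_ne_nil,
              List.map_cons, adjustFirst]
            have harith : k + 1 + ((sh.length : Int)) = k + ((sh.length : Int) + 1) := by ring
            simp [adjustFirst, harith]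

-- [:-1] is dropLast
theorem slice_to_neg_one {α : Type} (xs : List α) :
    PySem.List.slice xs none (some (-1)) = xs.dropLast := by
  rcases xs with _ | ⟨a, t⟩
  · rfl
  · simp [PySem.List.slice, PySem.List.clampIdx, List.dropLast_eq_take]
    split_ifs <;> omega

-- pure index-shift fact behind the range→diff-list conversion
theorem getD_diffs (a : Int) (t : List Int) :
    (List.range t.length).map (fun k => t.getD k 0 - (a :: t).getD k 0)
      = (List.zip (a :: t) t).map (fun p => p.2 - p.1) := by
  induction t generalizing a with
  | nil => simp
  | cons b t ih =>
      simp only [List.length_cons, List.range_succ_eq_map, List.map_cons, List.map_map,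
        List.zip_cons_cons]
      refine List.cons_eq_cons.mpr ⟨by simp, ?_⟩
      rw [← ih b]
      refine List.map_congr_left fun k hk => ?_
      simp [Function.comp]

-- the values A reads through indices ARE the diff list
theorem map_pyGetD_eq_diffs (xs : List Int) :
    (PySem.List.pyRange 1 (PySem.List.len xs) 1).map
        (fun i => PySem.List.pyGetD xs i 0 - PySem.List.pyGetD xs (i - 1) 0)
      = (List.zip xs xs.tail).map (fun p => p.2 - p.1) := by
  cases xs with
  | nil => simp
  | cons a t =>
      rw [PySem.List.pyRange_one]
      have h1 : ((PySem.List.len (a :: t)) - 1).toNat = t.length := by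
        simp [PySem.List.len]
      rw [h1, List.map_map]
      rw [show (List.zip (a :: t) (a :: t).tail) = List.zip (a :: t) t from rfl]
      rw [← getD_diffs a t]
      refine List.map_congr_left ?_
      intro k hk
      simp only [Function.comp]
      have h2 : (1 : Int) + (k : Int) = ((k + 1 : Nat) : Int) := by push_cast; ring
      have h3 : ((k + 1 : Nat) : Int) - 1 = ((k : Nat) : Int) := by push_cast; ring
      rw [h2, h3, PySem.List.pyGetD_natCast, PySem.List.pyGetD_natCast]
      simp

-- ===== VERDICT (by name: the statement is the Claim_ definition above) =====
theorem find_sequences_of_gaps_spec : Claim_equal_find_sequences_of_gaps := by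
  unfold Claim_equal_find_sequences_of_gaps
  intro adaptors gapSize _
  unfold Spec_find_sequences_of_gaps find_sequences_of_gaps find_sequences_of_gaps_alt
  simp only [PySem.List.slice_from_one]
  -- A: range fold → fold over the diff list
  rw [show (PySem.List.pyRange 1 (PySem.List.len adaptors) 1).foldl
        (fun (s : PySem.Dict Int Int × Int) i =>
          let diff := PySem.List.pyGetD adaptors i 0 - PySem.List.pyGetD adaptors (i - 1) 0
          if diff > gapSize then
            (if s.1.contains s.2 then s.1.modify s.2 0 (· + 1) else s.1.insert s.2 1, 0)
          else (s.1, s.2 + 1)) (PySem.Dict.empty, 0)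
      = ((List.zip adaptors adaptors.tail).map (fun p => p.2 - p.1)).foldl
          (fun (s : PySem.Dict Int Int × Int) x =>
            if x > gapSize then (ins s.1 s.2, 0) else (s.1, s.2 + 1)) (PySem.Dict.empty, 0) from ?_]
  · -- B: join of singletons, split = splitc, [:-1] = dropLast, tally = foldl ins over lengths
    have hmarks : PySem.Chars.join []
        ((List.zip adaptors adaptors.tail).map
          (fun p => if p.2 - p.1 > gapSize then ['|'] else ['.']))
        = ((List.zip adaptors adaptors.tail).map
            (fun p => if p.2 - p.1 > gapSize then '|' else '.')) := by
      rw [show ((List.zip adaptors adaptors.tail).map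
            (fun p => if p.2 - p.1 > gapSize then ['|'] else ['.']))
          = ((List.zip adaptors adaptors.tail).map
              (fun p => if p.2 - p.1 > gapSize then '|' else '.')).map (fun c => [c]) from by
            rw [List.map_map]; exact List.map_congr_left fun p _ => by
              by_cases h : p.2 - p.1 > gapSize <;> simp [h]]
      exact PySem.Chars.join_nil_singletons _
    rw [hmarks, splitOn_single, slice_to_neg_one]
    set ms := (List.zip adaptors adaptors.tail).map
      (fun p => if p.2 - p.1 > gapSize then '|' else '.') with hms
    -- A's diff fold equals the char fold over ms
    rw [show ((List.zip adaptors adaptors.tail).map (fun p => p.2 - p.1)).foldl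
          (fun (s : PySem.Dict Int Int × Int) x =>
            if x > gapSize then (ins s.1 s.2, 0) else (s.1, s.2 + 1)) (PySem.Dict.empty, 0)
        = ms.foldl (fun st c => if c = '|' then (ins st.1 st.2, 0) else (st.1, st.2 + 1))
            (PySem.Dict.empty, 0) from ?_]
    · rw [loop_eq ms PySem.Dict.empty 0, adjustFirst_zero]
      rw [show ((splitc ms).dropLast).foldl
            (fun (d : PySem.Dict Int Int) seg =>
              d.insert ((PySem.Chars.len seg : Int)) (d.getD ((PySem.Chars.len seg : Int)) 0 + 1))
            PySem.Dict.empty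
          = (((splitc ms).dropLast).map (fun s => (s.length : Int))).foldl ins PySem.Dict.empty from by
            rw [List.foldl_map]
            exact PySem.List.foldl_congr_mem _ _ _ _
              (by intro d s _; simp [ins, PySem.Chars.len_eq])]
    · rw [hms, List.foldl_map, List.foldl_map]
      refine PySem.List.foldl_congr_mem _ _ _ _ ?_
      intro st p _
      by_cases h : p.2 - p.1 > gapSize <;> simp [h]
  · rw [← map_pyGetD_eq_diffs adaptors, List.foldl_map]
    refine PySem.List.foldl_congr_mem _ _ _ _ ?_
    intro st i _
    simp only []
    by_cases h : PySem.List.pyGetD adaptors i 0 - PySem.List.pyGetD adaptors (i - 1) 0 > gapSize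
    · simp [h, ins, updA_eq_insert]
    · simp [h]
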